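-- pv_equiv track=rewrite | github.com/wyshi/lm_privacy | scripts/find_test_numbers.py | concate_numbers
-- ===== SOURCE A (Python) =====
-- from itertools import groupby
--
-- def concate_numbers(is_private, line_tokens, longer_than_1=False):
--     # https://stackoverflow.com/questions/6352425/whats-the-most-pythonic-way-to-identify-consecutive-duplicates-in-a-list
--     assert len(is_private) == len(line_tokens)
--     private_numbers = []
--     grouped_L = [(k, sum(1 for i in g)) for k,g in groupby(is_private)]
--     left, right = 0, 0
--     grouped_L1 = []
--     for private, num in grouped_L:
--         left = right
--         right += num
--         grouped_L1.append((private, [left, right]))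
--     for private, (l, r) in grouped_L1:
--         if private:
--             if longer_than_1:
--                 if len(line_tokens[l:r]) > 1:
--                     private_numbers.append("".join(line_tokens[l:r]))
--             else:
--                 private_numbers.append("".join(line_tokens[l:r]))
--     return private_numbers
-- ===== SOURCE B (Python) =====
-- def concate_numbers(is_private, line_tokens, longer_than_1=False):
--     assert len(is_private) == len(line_tokens)
--     result = []
--     buf = []
--     cur = None
--     for flag, tok in zip(is_private, line_tokens):
--         if flag == cur:
--             buf.append(tok)
--         else:
--             if cur and (not longer_than_1 or len(buf) > 1):
--                 result.append("".join(buf))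
--             buf = [tok]
--             cur = flag
--     if cur and (not longer_than_1 or len(buf) > 1):
--         result.append("".join(buf))
--     return result
-- ===== Notes on version B (the rewrite author's own statement) =====
-- stated objective: simpler
-- what changed: Replaced the groupby + prefix-sum interval construction + slicing pass with a single buffered pass over the zipped (flag, token) stream that flushes on flag change.
import Mathlib
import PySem

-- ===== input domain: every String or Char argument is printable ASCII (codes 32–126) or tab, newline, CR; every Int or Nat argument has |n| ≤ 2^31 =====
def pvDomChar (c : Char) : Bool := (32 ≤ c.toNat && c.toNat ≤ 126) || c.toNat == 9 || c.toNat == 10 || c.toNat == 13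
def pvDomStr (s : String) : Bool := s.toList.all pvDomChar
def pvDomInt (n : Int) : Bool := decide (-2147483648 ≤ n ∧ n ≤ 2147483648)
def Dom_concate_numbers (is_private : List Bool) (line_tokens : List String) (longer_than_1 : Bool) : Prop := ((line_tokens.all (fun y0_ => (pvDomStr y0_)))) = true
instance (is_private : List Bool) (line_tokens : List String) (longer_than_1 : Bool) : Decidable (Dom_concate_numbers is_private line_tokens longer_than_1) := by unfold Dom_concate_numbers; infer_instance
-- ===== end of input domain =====

-- B replaces A's groupby/interval/slice machinery by one buffered pass over the paired stream (objective: simpler).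

-- ===== PORT A =====
-- groupby(is_private) as (key, run length) pairs
def pvGbA : List Bool → List (Bool × Nat)
  | [] => []
  | b :: xs => (b, 1 + (xs.takeWhile (· == b)).length) :: pvGbA (xs.dropWhile (· == b))
  termination_by l => l.length
  decreasing_by
    have := List.length_dropWhile_le (· == b) xs
    simp only [List.length_cons]
    omega

-- the left/right accumulation loop building grouped_L1
def pvIntervalsA : List (Bool × Nat) → Nat → List (Bool × Nat × Nat)
  | [], _ => []
  | (p, n) :: rest, right => (p, right, right + n) :: pvIntervalsA rest (right + n)

-- the final loop appending "".join(line_tokens[l:r]) for private runs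
def pvCollectA (ts : List String) (lt1 : Bool) : List (Bool × Nat × Nat) → List String → List String
  | [], acc => acc
  | (p, l, r) :: rest, acc =>
    if p then
      if lt1 then
        if 1 < (PySem.List.slice ts (some (l : Int)) (some (r : Int))).length then
          pvCollectA ts lt1 rest (acc ++ [PySem.Str.join "" (PySem.List.slice ts (some (l : Int)) (some (r : Int)))])
        else pvCollectA ts lt1 rest acc
      else pvCollectA ts lt1 rest (acc ++ [PySem.Str.join "" (PySem.List.slice ts (some (l : Int)) (some (r : Int)))])
    else pvCollectA ts lt1 rest acc

def concate_numbers (is_private : List Bool) (line_tokens : List String) (longer_than_1 : Bool) : List String :=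
  pvCollectA line_tokens longer_than_1 (pvIntervalsA (pvGbA is_private) 0) []

-- ===== PORT B =====
-- flush the current buffer: `if cur and (not longer_than_1 or len(buf) > 1)`
def pvFlush (lt1 : Bool) (cur : Option Bool) (buf : List String) : List String :=
  if cur == some true && (!lt1 || decide (1 < buf.length)) then [PySem.Str.join "" buf] else []

-- `for flag, tok in zip(is_private, line_tokens)` with state (result, buf, cur)
def pvLoopB (lt1 : Bool) : List Bool → List String → List String → List String → Option Bool → List String
  | f :: fs, t :: ts, res, buf, cur =>
    if some f == cur then pvLoopB lt1 fs ts res (buf ++ [t]) cur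
    else pvLoopB lt1 fs ts (res ++ pvFlush lt1 cur buf) [t] (some f)
  | _, _, res, buf, cur => res ++ pvFlush lt1 cur buf

def concate_numbers_alt (is_private : List Bool) (line_tokens : List String) (longer_than_1 : Bool) : List String :=
  pvLoopB longer_than_1 is_private line_tokens [] [] none

-- ===== PRECONDITION & SPEC =====
-- Pre_ excludes exactly the inputs where A's (and B's) `assert len(is_private) == len(line_tokens)` raises AssertionError.
def Pre_concate_numbers (is_private : List Bool) (line_tokens : List String) (longer_than_1 : Bool) : Prop :=
  is_private.length = line_tokens.length
instance (is_private : List Bool) (line_tokens : List String) (longer_than_1 : Bool) : Decidable (Pre_concate_numbers is_private line_tokens longer_than_1) := by unfold Pre_concate_numbers; infer_instance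

def pvWitness_concate_numbers : List Bool × List String × Bool := ([true, true, false], (["12", "34", "x"], false))

def Spec_concate_numbers (is_private : List Bool) (line_tokens : List String) (longer_than_1 : Bool) (out : List String) : Prop := out = concate_numbers_alt is_private line_tokens longer_than_1
instance (is_private : List Bool) (line_tokens : List String) (longer_than_1 : Bool) (out : List String) : Decidable (Spec_concate_numbers is_private line_tokens longer_than_1 out) := by unfold Spec_concate_numbers; infer_instance

-- ===== CLAIM (what is proved, stated in full; the proofs are below) =====
def Claim_equal_concate_numbers : Prop := ∀ (is_private : List Bool) (line_tokens : List String) (longer_than_1 : Bool), Dom_concate_numbers is_private line_tokens longer_than_1 → Pre_concate_numbers is_private line_tokens longer_than_1 → Spec_concate_numbers is_private line_tokens longer_than_1 (concate_numbers is_private line_tokens longer_than_1)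

-- ===== LEMMAS AND PROOFS =====

-- common reference: process the runs of is_private, taking the matching tokens
def pvRef (lt1 : Bool) : List Bool → List String → List String
  | [], _ => []
  | b :: bs, ts =>
    pvFlush lt1 (some b) (ts.take ((bs.takeWhile (· == b)).length + 1)) ++
      pvRef lt1 (bs.dropWhile (· == b)) (ts.drop ((bs.takeWhile (· == b)).length + 1))
  termination_by bs => bs.length
  decreasing_by
    have := List.length_dropWhile_le (· == b) bs
    simp only [List.length_cons]
    omega

lemma collectA_step (lt1 p : Bool) (ts : List String) (L : List (Bool × Nat × Nat)) (l r : Nat) (acc : List String) :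
    pvCollectA ts lt1 ((p, l, r) :: L) acc
      = pvCollectA ts lt1 L (acc ++ pvFlush lt1 (some p) (PySem.List.slice ts (some (l : Int)) (some (r : Int)))) := by
  cases p with
  | false => simp [pvCollectA, pvFlush]
  | true =>
    cases lt1 with
    | false => simp [pvCollectA, pvFlush]
    | true =>
      by_cases h : 1 < (PySem.List.slice ts (some (l : Int)) (some (r : Int))).length <;>
        simp [pvCollectA, pvFlush, h]

lemma collectA_eq (lt1 : Bool) (ts : List String) :
    ∀ bs o acc, pvCollectA ts lt1 (pvIntervalsA (pvGbA bs) o) acc = acc ++ pvRef lt1 bs (ts.drop o) := by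
  intro bs
  induction bs using pvGbA.induct with
  | case1 => intro o acc; simp [pvGbA, pvIntervalsA, pvCollectA, pvRef]
  | case2 b xs ih =>
    intro o acc
    have hslice : PySem.List.slice ts (some (o : Int)) (some ((o + (1 + (xs.takeWhile (· == b)).length) : Nat) : Int))
        = (ts.drop o).take (1 + (xs.takeWhile (· == b)).length) := by
      push_cast
      exact PySem.List.slice_natCast_add ts o _
    have hdrop : List.drop (o + (1 + (xs.takeWhile (· == b)).length)) ts
        = List.drop ((xs.takeWhile (· == b)).length + 1) (List.drop o ts) := by
      rw [List.drop_drop]; ring_nf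
    rw [pvGbA, pvIntervalsA, collectA_step, ih, hslice, hdrop]
    rw [show pvRef lt1 (b :: xs) (List.drop o ts)
        = pvFlush lt1 (some b) ((List.drop o ts).take ((xs.takeWhile (· == b)).length + 1)) ++
          pvRef lt1 (xs.dropWhile (· == b)) ((List.drop o ts).drop ((xs.takeWhile (· == b)).length + 1)) from by rw [pvRef]]
    rw [Nat.add_comm 1 (xs.takeWhile (· == b)).length, List.append_assoc]

lemma loopB_eq (lt1 : Bool) :
    ∀ (fs : List Bool) (ts res buf : List String) (b : Bool), fs.length ≤ ts.length →
      pvLoopB lt1 fs ts res buf (some b)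
        = res ++ pvFlush lt1 (some b) (buf ++ ts.take (fs.takeWhile (· == b)).length)
            ++ pvRef lt1 (fs.dropWhile (· == b)) (ts.drop (fs.takeWhile (· == b)).length) := by
  intro fs
  induction fs with
  | nil => intro ts res buf b _; simp [pvLoopB, pvRef]
  | cons f fs' ih =>
    intro ts res buf b hlen
    cases ts with
    | nil => simp at hlen
    | cons t ts' =>
      simp only [List.length_cons, Nat.add_le_add_iff_right] at hlen
      by_cases hf : f = b
      · subst hf
        rw [show pvLoopB lt1 (f :: fs') (t :: ts') res buf (some f)
            = pvLoopB lt1 fs' ts' res (buf ++ [t]) (some f) from by simp [pvLoopB]]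
        rw [ih ts' res (buf ++ [t]) f hlen]
        simp [List.takeWhile, List.dropWhile, List.append_assoc]
      · have hfb : (f == b) = false := by simp [hf]
        rw [show pvLoopB lt1 (f :: fs') (t :: ts') res buf (some b)
            = pvLoopB lt1 fs' ts' (res ++ pvFlush lt1 (some b) buf) [t] (some f) from by
              simp [pvLoopB, hfb]]
        rw [ih ts' (res ++ pvFlush lt1 (some b) buf) [t] f hlen]
        rw [show (f :: fs').takeWhile (· == b) = [] from by simp [hfb]]
        rw [show (f :: fs').dropWhile (· == b) = f :: fs' from by simp [hfb]]
        simp only [List.length_nil, List.take_zero, List.drop_zero, List.append_nil]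
        rw [show pvRef lt1 (f :: fs') (t :: ts')
            = pvFlush lt1 (some f) ((t :: ts').take ((fs'.takeWhile (· == f)).length + 1)) ++
              pvRef lt1 (fs'.dropWhile (· == f)) ((t :: ts').drop ((fs'.takeWhile (· == f)).length + 1)) from by rw [pvRef]]
        simp [List.take_succ_cons, List.drop_succ_cons, List.append_assoc]

-- ===== VERDICT (by name: the statement is the Claim_ definition above) =====
theorem concate_numbers_spec : Claim_equal_concate_numbers := by
  intro bs ts lt1 _ hpre
  unfold Pre_concate_numbers at hpre
  unfold Spec_concate_numbers concate_numbers concate_numbers_alt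
  rw [show pvCollectA ts lt1 (pvIntervalsA (pvGbA bs) 0) [] = [] ++ pvRef lt1 bs (ts.drop 0) from collectA_eq lt1 ts bs 0 []]
  simp only [List.drop_zero, List.nil_append]
  cases bs with
  | nil =>
    cases ts with
    | nil => simp [pvLoopB, pvRef, pvFlush]
    | cons t ts' => simp at hpre
  | cons b xs =>
    cases ts with
    | nil => simp at hpre
    | cons t us =>
      simp only [List.length_cons, Nat.add_right_cancel_iff] at hpre
      rw [show pvLoopB lt1 (b :: xs) (t :: us) [] [] none
          = pvLoopB lt1 xs us ([] ++ pvFlush lt1 none []) [t] (some b) from by simp [pvLoopB]]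
      rw [loopB_eq lt1 xs us ([] ++ pvFlush lt1 none []) [t] b (le_of_eq hpre)]
      rw [show pvRef lt1 (b :: xs) (t :: us)
          = pvFlush lt1 (some b) ((t :: us).take ((xs.takeWhile (· == b)).length + 1)) ++
            pvRef lt1 (xs.dropWhile (· == b)) ((t :: us).drop ((xs.takeWhile (· == b)).length + 1)) from by rw [pvRef]]
      simp [pvFlush]
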